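-- pv_equiv track=rewrite | github.com/Arsen1302/Code-copy-detector | TestData/solutions/problem_936_2.py | solution_936_2
-- ===== SOURCE A (Python) =====
-- from typing import List
--
-- def solution_936_2(nums: List[int]) -> List[int]:
--     if (len(nums) == 1):
--         return nums
--     nums.sort()
--     count = 0
--     num = []
--     l = len(nums)
--     for i in range(1,l+1):
--         count += nums[-i]
--         num.append(nums[-i])
--         if count > sum(nums[:l-i]):
--             return (num)
-- ===== SOURCE B (Python) =====
-- from itertools import accumulate
--
-- def solution_936_2(nums):
--     # Note: like A, this sorts `nums` in place (observable side effect).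
--     if len(nums) == 1:
--         return nums
--     nums.sort()
--     desc = nums[::-1]
--     total = sum(desc)
--     k = next((i for i, p in enumerate(accumulate(desc)) if 2 * p > total), None)
--     if k is not None:
--         return desc[:k + 1]
-- ===== Notes on version B (the rewrite author's own statement) =====
-- stated objective: alternative
-- what changed: B replaces A's incremental append/early-return loop that re-sums the remaining prefix slice every iteration by staged passes: accumulate the prefix sums of the descending sorted list, find the first index where twice the prefix sum exceeds the total, and return a single slice desc[:k+1]; it trades A's quadratic worst-case re-summing for one running accumulation, though on typical inputs both are dominated by the sort.
-- outside the precondition, e.g. on solution_936_2([0, 0]): A returns None, B returns None; on solution_936_2([]): A returns None, B returns None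
import Mathlib
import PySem

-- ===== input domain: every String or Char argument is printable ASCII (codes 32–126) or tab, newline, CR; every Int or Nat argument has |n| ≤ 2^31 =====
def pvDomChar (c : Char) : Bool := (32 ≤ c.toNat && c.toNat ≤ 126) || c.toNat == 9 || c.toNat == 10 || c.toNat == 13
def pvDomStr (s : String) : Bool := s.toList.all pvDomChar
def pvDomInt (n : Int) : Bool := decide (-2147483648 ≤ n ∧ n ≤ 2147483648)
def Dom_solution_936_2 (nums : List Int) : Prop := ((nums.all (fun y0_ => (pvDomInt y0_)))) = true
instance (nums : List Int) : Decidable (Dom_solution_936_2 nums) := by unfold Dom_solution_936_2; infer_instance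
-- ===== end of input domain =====

-- B replaces A's loop (running append + per-iteration re-summing of the prefix slice) by staged
-- passes: accumulate the prefix sums of the descending sorted list, find the first index where
-- twice the prefix sum exceeds the total, and return one slice (objective: alternative).
-- Both A and B sort `nums` in place; the theorems below are about the return value.

-- ===== PORT A =====
-- Python's loop `for i in range(1, l+1)` with early `return num`; `none` = fell through (Python returns None).
def pvALoop (s : List Int) (l : Int) : List Int → Int → List Int → Option (List Int)
  | [], _, _ => none
  | i :: is, count, num =>
    match PySem.List.pyGet? s (-i) with          -- nums[-i]
    | none => none
    | some v =>
      if count + v > (PySem.List.slice s none (some (l - i))).sum   -- count > sum(nums[:l-i])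
      then some (num ++ [v])
      else pvALoop s l is (count + v) (num ++ [v])

def solution_936_2 (nums : List Int) : List Int :=
  if nums.length = 1 then nums
  else
    let s := PySem.List.sorted nums (fun x => x) false               -- nums.sort()
    (pvALoop s (s.length : Int) (PySem.List.pyRange 1 ((s.length : Int) + 1) 1) 0 []).getD []

-- ===== PORT B =====
-- itertools.accumulate(desc) with carry c (c = 0 at the top call)
def pvAccum (c : Int) : List Int → List Int
  | [] => []
  | x :: xs => (c + x) :: pvAccum (c + x) xs

def solution_936_2_alt (nums : List Int) : List Int :=
  if nums.length = 1 then nums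
  else
    let s := PySem.List.sorted nums (fun x => x) false               -- nums.sort()
    let desc := (PySem.List.slice? s none none (-1)).getD []         -- nums[::-1]
    let total := desc.sum                                            -- sum(desc)
    let prefs := pvAccum 0 desc                                      -- list(accumulate(desc))
    match prefs.findIdx? (fun p => decide (2 * p > total)) with      -- next((i for i,p in …), None)
    | some k => desc.take (k + 1)                                    -- desc[:k+1]
    | none => []                                                     -- Python returns None

-- ===== PRECONDITION & SPEC =====
-- Pre_ excludes exactly the inputs (len ≠ 1) on which A's loop never fires, where A falls
-- off the end and returns None — not a value of the declared List[int] type; B does the same there.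
def Pre_solution_936_2 (nums : List Int) : Prop :=
  nums.length = 1 ∨
    (nums ≠ [] ∧
      2 * (if nums.any (fun x => 0 < x) then (nums.filter (fun x => 0 < x)).sum
           else nums.foldl max (nums.headD 0)) > nums.sum)
instance (nums : List Int) : Decidable (Pre_solution_936_2 nums) := by unfold Pre_solution_936_2; infer_instance

def pvWitness_solution_936_2 : List Int := [3, 1, 2]

def Spec_solution_936_2 (nums : List Int) (out : List Int) : Prop := out = solution_936_2_alt nums
instance (nums : List Int) (out : List Int) : Decidable (Spec_solution_936_2 nums out) := by unfold Spec_solution_936_2; infer_instance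

-- ===== CLAIM (what is proved, stated in full; the proofs are below) =====
def Claim_equal_solution_936_2 : Prop := ∀ (nums : List Int), Dom_solution_936_2 nums → Pre_solution_936_2 nums → Spec_solution_936_2 nums (solution_936_2 nums)

-- ===== LEMMAS AND PROOFS =====

-- Proof-only intermediate: a single-pass running-sum loop over the descending list, used as the
-- bridge between A's index loop and B's accumulate-then-search formulation.
def gLoop : List Int → Int → Int → List Int → Option (List Int)
  | [], _, _, _ => none
  | x :: xs, taken, total, res =>
    if taken + x > total - (taken + x) then some (res ++ [x])
    else gLoop xs (taken + x) total (res ++ [x])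

-- A's loop over indices k+1, …, l equals the bridge loop over the tail of the reversed sorted list,
-- given the running-sum invariant `count = sum of the k largest`.
lemma loop_eq (s : List Int) :
    ∀ (n k : Nat) (num : List Int), k ≤ s.length → n = s.length - k →
      pvALoop s (s.length : Int) (PySem.List.pyRange ((k : Int) + 1) ((s.length : Int) + 1) 1)
        ((s.reverse.take k).sum) num
      = gLoop (s.reverse.drop k) ((s.reverse.take k).sum) s.sum num := by
  intro n
  induction n with
  | zero =>
    intro k num hk hn
    have hk' : k = s.length := by omega
    subst hk'
    rw [PySem.List.pyRange_one_eq_nil (by omega)]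
    rw [show s.reverse.drop s.length = [] from by
      apply List.drop_eq_nil_of_le; simp]
    rfl
  | succ n ih =>
    intro k num hk hn
    have hkl : k < s.length := by omega
    obtain ⟨x, xs, hds⟩ : ∃ x xs, s.reverse.drop k = x :: xs := by
      cases h : s.reverse.drop k with
      | nil =>
        exfalso
        have := congrArg List.length h
        simp at this
        omega
      | cons a b => exact ⟨a, b, rfl⟩
    have hrk : s.reverse[k]? = some x := by
      have h0 : (s.reverse.drop k)[0]? = some x := by rw [hds]; rfl
      rw [List.getElem?_drop] at h0
      simpa using h0
    have hx : s[s.length - (k + 1)]? = some x := by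
      rw [List.getElem?_reverse (by simpa using hkl)] at hrk
      rw [show s.length - (k + 1) = s.length - 1 - k from by omega]
      exact hrk
    have hget : PySem.List.pyGet? s (-((k : Int) + 1)) = some x := by
      have h2 := PySem.List.pyGet?_neg_natCast s (k + 1) (by omega) (by omega)
      have hcast : -(((k + 1 : Nat) : Int)) = -((k : Int) + 1) := by push_cast; ring
      rw [hcast] at h2
      rw [h2, hx]
    have hslice : PySem.List.slice s none (some ((s.length : Int) - ((k : Int) + 1)))
        = s.take (s.length - (k + 1)) := by
      rw [PySem.List.slice_to s (by omega)]
      congr 1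
      omega
    have hsum1 : (s.reverse.take (k + 1)).sum = (s.reverse.take k).sum + x := by
      rw [List.take_add_one, hrk]
      simp
    have hsum2 : (s.take (s.length - (k + 1))).sum
        = s.sum - ((s.reverse.take k).sum + x) := by
      have hsd := List.sum_take_add_sum_drop s (s.length - (k + 1))
      have hrev : s.reverse.take (k + 1) = (s.drop (s.length - (k + 1))).reverse := by
        rw [List.take_reverse]
      have : (s.reverse.take (k + 1)).sum = (s.drop (s.length - (k + 1))).sum := by
        rw [hrev, List.sum_reverse]
      omega
    rw [PySem.List.pyRange_one_cons (by omega), hds]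
    simp only [pvALoop, gLoop, hget, hslice, hsum2]
    split_ifs with hc
    · rfl
    · have hdrop : s.reverse.drop (k + 1) = xs := by
        rw [← List.tail_drop, hds]; rfl
      have := ih (k + 1) (num ++ [x]) (by omega) (by omega)
      rw [hdrop, hsum1] at this
      rw [show ((k : Int) + 1) + 1 = ((k + 1 : Nat) : Int) + 1 from by push_cast; ring]
      exact this

-- The bridge loop equals B's accumulate-then-findIdx formulation.
lemma gLoop_eq_find (total : Int) :
    ∀ (xs : List Int) (taken : Int) (res : List Int),
      gLoop xs taken total res
        = match (pvAccum taken xs).findIdx? (fun p => decide (2 * p > total)) with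
          | some k => some (res ++ xs.take (k + 1))
          | none => none := by
  intro xs
  induction xs with
  | nil => intro taken res; rfl
  | cons x xs ih =>
    intro taken res
    simp only [gLoop, pvAccum, List.findIdx?_cons]
    by_cases hc : 2 * (taken + x) > total
    · rw [if_pos (by omega), if_pos (by simpa using hc)]
      simp
    · rw [if_neg (by omega), if_neg (by simpa using hc)]
      rw [ih (taken + x) (res ++ [x])]
      cases h : (pvAccum (taken + x) xs).findIdx? (fun p => decide (2 * p > total)) with
      | none => simp
      | some k => simp

theorem equal_all (nums : List Int) : solution_936_2 nums = solution_936_2_alt nums := by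
  unfold solution_936_2 solution_936_2_alt
  split_ifs with h
  · rfl
  · simp only [PySem.List.slice?_none_none_neg_one, Option.getD_some]
    have h1 := loop_eq (PySem.List.sorted nums (fun x => x) false)
      (PySem.List.sorted nums (fun x => x) false).length 0 [] (by omega) (by omega)
    simp only [List.take_zero, List.sum_nil, List.drop_zero, Nat.cast_zero, zero_add] at h1
    rw [h1, gLoop_eq_find]
    rw [show (PySem.List.sorted nums (fun x => x) false).sum
        = (PySem.List.sorted nums (fun x => x) false).reverse.sum from (List.sum_reverse _).symm]
    cases hf : ((pvAccum 0 (PySem.List.sorted nums (fun x => x) false).reverse).findIdx?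
        (fun p => decide (2 * p > (PySem.List.sorted nums (fun x => x) false).reverse.sum))) with
    | none => simp
    | some k => simp

-- ===== VERDICT (by name: the statement is the Claim_ definition above) =====
theorem solution_936_2_spec : Claim_equal_solution_936_2 := by
  intro nums _ _
  unfold Spec_solution_936_2
  exact equal_all nums
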